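-- pv_equiv track=rewrite | github.com/alago1/aoc-2024 | 4/4.py | get_subarray
-- ===== SOURCE A (Python) =====
-- def is_valid(y, x, grid):
--     return 0 <= y < len(grid) and 0 <= x < len(grid[y])
--
-- def get_subarray(y0, x0, dy, dx, grid):
--     out = []
--     for delta_y in range(dy+1):
--         for delta_x in range(dx+1):
--             if not is_valid(y0 + delta_y, x0 + delta_x, grid):
--                 return None
--             out.append(grid[y0 + delta_y][x0 + delta_x])
--     return "".join(out)
-- ===== SOURCE B (Python) =====
-- def get_subarray(y0, x0, dy, dx, grid):
--     if dy < 0 or dx < 0: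
--         return ""
--     if y0 < 0 or y0 + dy >= len(grid) or x0 < 0:
--         return None
--     parts = []
--     for row in grid[y0:y0 + dy + 1]:
--         if x0 + dx >= len(row):
--             return None
--         parts.append("".join(row[x0:x0 + dx + 1]))
--     return "".join(parts)
-- ===== Notes on version B (the rewrite author's own statement) =====
-- stated objective: simpler
-- what changed: Replaces A's per-cell double loop that re-checks bounds on every single cell with upfront guards for the degenerate/out-of-range spans plus one slice-and-join pass per row.
import Mathlib
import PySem

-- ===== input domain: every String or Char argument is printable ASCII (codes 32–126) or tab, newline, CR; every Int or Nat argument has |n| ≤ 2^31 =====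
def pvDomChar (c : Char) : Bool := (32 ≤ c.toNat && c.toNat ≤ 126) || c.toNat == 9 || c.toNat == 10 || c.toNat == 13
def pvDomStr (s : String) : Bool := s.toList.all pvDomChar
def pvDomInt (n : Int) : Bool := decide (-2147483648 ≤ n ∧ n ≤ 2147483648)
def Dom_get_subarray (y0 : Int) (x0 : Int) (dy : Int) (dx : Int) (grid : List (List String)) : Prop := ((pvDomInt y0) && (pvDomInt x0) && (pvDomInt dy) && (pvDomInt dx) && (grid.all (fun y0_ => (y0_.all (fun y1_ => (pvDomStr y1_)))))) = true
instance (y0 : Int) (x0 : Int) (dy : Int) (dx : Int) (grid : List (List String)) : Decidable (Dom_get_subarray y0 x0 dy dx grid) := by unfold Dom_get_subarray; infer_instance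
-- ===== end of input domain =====

-- B replaces A's per-cell double loop (with a bounds check on every cell) by upfront
-- span/row-window guards and one slice per row; objective: simpler. Equal return value proved below.

-- ===== PORT A =====
-- is_valid(y, x, grid): Python's chained 'and' short-circuits, so grid[y] is only read
-- when 0 <= y < len(grid); the getD [] default is therefore never the deciding value.
def pvIsValid (y : Int) (x : Int) (grid : List (List String)) : Bool :=
  decide (0 ≤ y) && decide (y < (grid.length : Int)) &&
    (decide (0 ≤ x) && decide (x < ((((PySem.List.pyGet? grid y).getD []).length : Int))))

-- grid[y][x]; only evaluated after pvIsValid guaranteed both indices in range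
def pvCell (grid : List (List String)) (y : Int) (x : Int) : String :=
  PySem.List.pyGetD ((PySem.List.pyGet? grid y).getD []) x ""

-- inner 'for delta_x in range(dx+1)' with early 'return None'; Python's range is lazy,
-- so the loop is ported as a counter (remaining iterations, current delta_x), exact step for step
def pvAInner (grid : List (List String)) (y : Int) (x0 : Int) :
    Nat → Int → List String → Option (List String)
  | 0, _, out => some out
  | n + 1, dX, out =>
    if pvIsValid y (x0 + dX) grid then
      pvAInner grid y x0 n (dX + 1) (out ++ [pvCell grid y (x0 + dX)])
    else none

-- outer 'for delta_y in range(dy+1)', same lazy-counter transliteration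
def pvAOuter (grid : List (List String)) (y0 : Int) (x0 : Int) (dx : Int) :
    Nat → Int → List String → Option (List String)
  | 0, _, out => some out
  | n + 1, dY, out =>
    match pvAInner grid (y0 + dY) x0 (dx + 1).toNat 0 out with
    | none => none
    | some out' => pvAOuter grid y0 x0 dx n (dY + 1) out'

def get_subarray (y0 : Int) (x0 : Int) (dy : Int) (dx : Int) (grid : List (List String)) : Option String :=
  (pvAOuter grid y0 x0 dx (dy + 1).toNat 0 []).map (PySem.Str.join "")

-- ===== PORT B =====
-- per-row pass: reject a too-short row, else take the row slice
def pvBRows (x0 : Int) (dx : Int) :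
    List (List String) → List String → Option (List String)
  | [], acc => some acc
  | row :: rest, acc =>
    if (row.length : Int) ≤ x0 + dx then none
    else pvBRows x0 dx rest
      (acc ++ [PySem.Str.join "" (PySem.List.slice row (some x0) (some (x0 + dx + 1)))])

def get_subarray_alt (y0 : Int) (x0 : Int) (dy : Int) (dx : Int) (grid : List (List String)) : Option String :=
  if dy < 0 || dx < 0 then some ""
  else if y0 < 0 || (grid.length : Int) ≤ y0 + dy || x0 < 0 then none
  else
    (pvBRows x0 dx (PySem.List.slice grid (some y0) (some (y0 + dy + 1))) []).map
      (PySem.Str.join "")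

-- ===== PRECONDITION & SPEC =====
def Spec_get_subarray (y0 : Int) (x0 : Int) (dy : Int) (dx : Int) (grid : List (List String)) (out : Option String) : Prop := out = get_subarray_alt y0 x0 dy dx grid
instance (y0 : Int) (x0 : Int) (dy : Int) (dx : Int) (grid : List (List String)) (out : Option String) : Decidable (Spec_get_subarray y0 x0 dy dx grid out) := by unfold Spec_get_subarray; infer_instance

-- ===== CLAIM (what is proved, stated in full; the proofs are below) =====
def Claim_equal_get_subarray : Prop := ∀ (y0 : Int) (x0 : Int) (dy : Int) (dx : Int) (grid : List (List String)), Dom_get_subarray y0 x0 dy dx grid → Spec_get_subarray y0 x0 dy dx grid (get_subarray y0 x0 dy dx grid)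

-- ===== LEMMAS AND PROOFS =====

lemma pyRange_nil {a b : Int} (h : b ≤ a) : PySem.List.pyRange a b = [] := by
  simp [PySem.List.pyRange, show ¬ a < b by omega]

lemma strJoin_nil : PySem.Str.join "" [] = "" := by
  simp [PySem.Str.join, PySem.Chars.join_nil]

lemma toNat_range (m : Int) :
    PySem.List.pyRange 0 ((m.toNat : Int)) = PySem.List.pyRange 0 m := by
  by_cases h : 0 ≤ m
  · rw [Int.toNat_of_nonneg h]
  · rw [pyRange_nil (by omega), pyRange_nil (by omega)]

-- A's inner loop, characterised: succeeds iff every cell of the row window is valid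
lemma aInner_eq (grid : List (List String)) (y x0 : Int) (n : Nat) (dX : Int) (out : List String) :
    pvAInner grid y x0 n dX out =
      if (PySem.List.pyRange dX (dX + n)).all (fun d => pvIsValid y (x0 + d) grid) then
        some (out ++ (PySem.List.pyRange dX (dX + n)).map (fun d => pvCell grid y (x0 + d)))
      else none := by
  induction n generalizing dX out with
  | zero => rw [pyRange_nil (by omega)]; simp [pvAInner]
  | succ n ih =>
    rw [PySem.List.pyRange_one_cons (by omega : dX < dX + (n + 1 : Nat)),
      show dX + ((n : Nat) + 1 : Nat) = (dX + 1) + (n : Nat) by push_cast; ring]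
    by_cases h : pvIsValid y (x0 + dX) grid
    · simp [pvAInner, h, ih]
    · simp [pvAInner, h]

-- A's outer loop, characterised
lemma aOuter_eq (grid : List (List String)) (y0 x0 dx : Int) (n : Nat) (dY : Int) (out : List String) :
    pvAOuter grid y0 x0 dx n dY out =
      if (PySem.List.pyRange dY (dY + n)).all (fun dY' =>
          (PySem.List.pyRange 0 (dx + 1)).all (fun dX => pvIsValid (y0 + dY') (x0 + dX) grid)) then
        some (out ++ (PySem.List.pyRange dY (dY + n)).flatMap (fun dY' =>
          (PySem.List.pyRange 0 (dx + 1)).map (fun dX => pvCell grid (y0 + dY') (x0 + dX))))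
      else none := by
  induction n generalizing dY out with
  | zero => rw [pyRange_nil (by omega)]; simp [pvAOuter]
  | succ n ih =>
    rw [PySem.List.pyRange_one_cons (by omega : dY < dY + (n + 1 : Nat)),
      show dY + ((n : Nat) + 1 : Nat) = (dY + 1) + (n : Nat) by push_cast; ring]
    have hb : pvAInner grid (y0 + dY) x0 (dx + 1).toNat 0 out =
        if (PySem.List.pyRange 0 (dx + 1)).all (fun dX => pvIsValid (y0 + dY) (x0 + dX) grid) then
          some (out ++ (PySem.List.pyRange 0 (dx + 1)).map (fun dX => pvCell grid (y0 + dY) (x0 + dX)))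
        else none := by
      rw [aInner_eq, show (0 : Int) + (((dx + 1).toNat : Nat) : Int) = (((dx + 1).toNat : Nat) : Int) by ring,
        toNat_range]
    by_cases h : (PySem.List.pyRange 0 (dx + 1)).all (fun dX => pvIsValid (y0 + dY) (x0 + dX) grid)
    · simp [pvAOuter, hb, h, ih]
    · simp [pvAOuter, hb, h]

-- B's row loop, characterised
lemma bRows_eq (x0 dx : Int) (rows : List (List String)) (acc : List String) :
    pvBRows x0 dx rows acc =
      if rows.all (fun row => decide (x0 + dx < (row.length : Int))) then
        some (acc ++ rows.map (fun row =>
          PySem.Str.join "" (PySem.List.slice row (some x0) (some (x0 + dx + 1)))))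
      else none := by
  induction rows generalizing acc with
  | nil => simp [pvBRows]
  | cons row rest ih =>
    by_cases h : x0 + dx < (row.length : Int)
    · simp [pvBRows, show ¬ ((row.length : Int) ≤ x0 + dx) by omega, h, ih]
    · simp [pvBRows, show (row.length : Int) ≤ x0 + dx by omega, h]

lemma all_congr_mem {α : Type} {l : List α} {p q : α → Bool} (h : ∀ x ∈ l, p x = q x) :
    l.all p = l.all q := by
  induction l with
  | nil => simp
  | cons a rest ih =>
    simp only [List.all_cons, h a (List.mem_cons_self), ih (fun x hx => h x (List.mem_cons_of_mem a hx))]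

lemma charsJoin_nil_flatten (l : List (List Char)) :
    PySem.Chars.join [] l = l.flatten := by
  induction l with
  | nil => simp [PySem.Chars.join_nil]
  | cons p rest ih =>
    cases rest with
    | nil => simp [PySem.Chars.join_singleton]
    | cons q rest' =>
      rw [PySem.Chars.join_cons_cons, ih]
      simp

lemma flatten_map_flatten {α : Type} (g : α → List (List Char)) (l : List α) :
    (l.map (fun x => (g x).flatten)).flatten = (l.flatMap g).flatten := by
  induction l with
  | nil => simp
  | cons a rest ih => simp [ih]

-- "".join over a flat list equals "".join of per-chunk "".joins
lemma join_flat {α : Type} (f : α → List String) (l : List α) :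
    PySem.Str.join "" (l.map fun x => PySem.Str.join "" (f x)) =
      PySem.Str.join "" (l.flatMap f) := by
  unfold PySem.Str.join
  congr 1
  rw [show ("" : String).toList = [] from rfl, charsJoin_nil_flatten, charsJoin_nil_flatten]
  simp only [List.map_map, Function.comp_def]
  have : (fun x => (String.ofList (PySem.Chars.join [] (List.map String.toList (f x)))).toList)
      = fun x => ((f x).map String.toList).flatten := by
    funext x
    rw [String.toList_ofList, charsJoin_nil_flatten]
  rw [this, flatten_map_flatten (fun x => (f x).map String.toList)]
  rw [List.map_flatMap]

-- a length-n slice starting at a in-range position is the indexed map over range(n)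
lemma slice_eq_map_range {α : Type} (xs : List α) (a n : Int) (d : α)
    (ha : 0 ≤ a) (hn : 0 ≤ n) (h : a + n ≤ (xs.length : Int)) :
    PySem.List.slice xs (some a) (some (a + n)) =
      (PySem.List.pyRange 0 n).map (fun k => PySem.List.pyGetD xs (a + k) d) := by
  lift a to ℕ using ha with A
  lift n to ℕ using hn with N
  rw [show ((A : Int) + (N : Int)) = ((A : Int) + (N : Int)) from rfl]
  rw [PySem.List.slice_natCast_add, PySem.List.pyRange_zero_natCast, List.map_map]
  apply List.ext_getElem
  · simp; omega
  · intro i h1 h2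
    have hA : A + i < xs.length := by
      simp at h1
      omega
    simp only [List.getElem_take, List.getElem_drop, Function.comp_apply, List.getElem_map,
      List.getElem_range]
    rw [show ((A : Int) + (i : Int)) = (((A + i : ℕ) : Int)) by push_cast; ring]
    rw [PySem.List.pyGetD_natCast, List.getD_eq_getElem _ _ hA]

-- A's inner all-valid condition, under a valid y and 0 ≤ x0 ≤ x0+dx
lemma inner_all_iff (grid : List (List String)) (y x0 dx : Int)
    (hy0 : 0 ≤ y) (hy1 : y < (grid.length : Int)) (hx : 0 ≤ x0) (hdx : 0 ≤ dx) :
    ((PySem.List.pyRange 0 (dx + 1)).all (fun dX => pvIsValid y (x0 + dX) grid)) =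
      decide (x0 + dx < (((PySem.List.pyGet? grid y).getD []).length : Int)) := by
  rw [Bool.eq_iff_iff]
  simp only [List.all_eq_true, PySem.List.mem_pyRange_one, pvIsValid, Bool.and_eq_true,
    decide_eq_true_eq]
  constructor
  · intro hAll
    exact (hAll dx ⟨hdx, by omega⟩).2.2
  · intro hlt dX hmem
    exact ⟨⟨hy0, hy1⟩, by omega, by omega⟩

-- ===== VERDICT (by name: the statement is the Claim_ definition above) =====
theorem get_subarray_spec : Claim_equal_get_subarray := by
  intro y0 x0 dy dx grid _
  unfold Spec_get_subarray get_subarray get_subarray_alt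
  have houter : pvAOuter grid y0 x0 dx (dy + 1).toNat 0 [] =
      if (PySem.List.pyRange 0 (dy + 1)).all (fun dY' =>
          (PySem.List.pyRange 0 (dx + 1)).all (fun dX => pvIsValid (y0 + dY') (x0 + dX) grid)) then
        some ([] ++ (PySem.List.pyRange 0 (dy + 1)).flatMap (fun dY' =>
          (PySem.List.pyRange 0 (dx + 1)).map (fun dX => pvCell grid (y0 + dY') (x0 + dX))))
      else none := by
    rw [aOuter_eq, show (0 : Int) + (((dy + 1).toNat : Nat) : Int) = (((dy + 1).toNat : Nat) : Int) by ring,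
      toNat_range]
  by_cases hdy : dy < 0
  · rw [houter, pyRange_nil (show dy + 1 ≤ 0 by omega)]
    simp [hdy, strJoin_nil]
  · by_cases hdx : dx < 0
    · rw [houter, pyRange_nil (show dx + 1 ≤ 0 by omega)]
      rw [if_pos (by simp : ((PySem.List.pyRange 0 (dy + 1)).all fun dY =>
        ([] : List Int).all fun dX => pvIsValid (y0 + dY) (x0 + dX) grid) = true)]
      simp only [List.map_nil, List.nil_append, Option.map_some]
      rw [show (PySem.List.pyRange 0 (dy + 1)).flatMap (fun _ : Int => ([] : List String)) = []
        from by simp]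
      rw [strJoin_nil, if_pos (by simp [hdx] : (decide (dy < 0) || decide (dx < 0)) = true)]
    · -- dy ≥ 0, dx ≥ 0
      simp only [hdy, hdx, decide_false, Bool.or_self, Bool.false_eq_true, if_false]
      rw [houter]
      by_cases hbad : y0 < 0 ∨ (grid.length : Int) ≤ y0 + dy ∨ x0 < 0
      · -- some cell index is invalid on every branch: A's all-condition is false, B guards
        have hall : ¬ ((PySem.List.pyRange 0 (dy + 1)).all (fun dY =>
            (PySem.List.pyRange 0 (dx + 1)).all
              (fun dX => pvIsValid (y0 + dY) (x0 + dX) grid)) = true) := by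
          simp only [List.all_eq_true, PySem.List.mem_pyRange_one]
          intro hAll
          rcases hbad with h | h | h
          · have := hAll 0 ⟨le_refl 0, by omega⟩ 0 ⟨le_refl 0, by omega⟩
            simp [pvIsValid] at this
            omega
          · have := hAll dy ⟨by omega, by omega⟩ 0 ⟨le_refl 0, by omega⟩
            simp [pvIsValid] at this
            omega
          · have := hAll 0 ⟨le_refl 0, by omega⟩ 0 ⟨le_refl 0, by omega⟩
            simp [pvIsValid] at this
            omega
        rw [if_neg hall]
        have : (y0 < 0 || (grid.length : Int) ≤ y0 + dy || x0 < 0) = true := by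
          simp only [Bool.or_eq_true, decide_eq_true_eq]
          tauto
        simp [this]
      · have hy0 : 0 ≤ y0 := by omega
        have hylen : y0 + dy < (grid.length : Int) := by omega
        have hx0 : 0 ≤ x0 := by omega
        have hguard : (y0 < 0 || (grid.length : Int) ≤ y0 + dy || x0 < 0) = false := by
          simp only [Bool.or_eq_false_iff, decide_eq_false_iff_not]
          exact ⟨⟨by omega, by omega⟩, by omega⟩
        simp only [hguard, Bool.false_eq_true, if_false]
        rw [bRows_eq]
        -- rewrite the row slice as an indexed map over range(dy+1)
        rw [show y0 + dy + 1 = y0 + (dy + 1) by ring,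
          slice_eq_map_range grid y0 (dy + 1) ([] : List String) hy0 (by omega) (by omega)]
        rw [List.all_map, List.map_map]
        -- condition sides agree pointwise on the range
        have hcond : ∀ dY ∈ PySem.List.pyRange 0 (dy + 1),
            ((PySem.List.pyRange 0 (dx + 1)).all
              (fun dX => pvIsValid (y0 + dY) (x0 + dX) grid)) =
            ((fun row => decide (x0 + dx < (row.length : Int))) ∘
              fun k => PySem.List.pyGetD grid (y0 + k) ([] : List String)) dY := by
          intro dY hm
          rw [PySem.List.mem_pyRange_one] at hm
          exact inner_all_iff grid (y0 + dY) x0 dx (by omega) (by omega) hx0 (by omega)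
        rw [all_congr_mem hcond]
        by_cases hok : ((PySem.List.pyRange 0 (dy + 1)).all
            ((fun row => decide (x0 + dx < (row.length : Int))) ∘
              fun k => PySem.List.pyGetD grid (y0 + k) ([] : List String))) = true
        · rw [if_pos hok, if_pos hok]
          simp only [List.nil_append, Option.map_some]
          congr 1
          -- per-row: the inner map of cells is the row slice
          have hrow : ∀ dY ∈ PySem.List.pyRange 0 (dy + 1),
              ((fun row => PySem.Str.join ""
                  (PySem.List.slice row (some x0) (some (x0 + dx + 1)))) ∘
                fun k => PySem.List.pyGetD grid (y0 + k) ([] : List String)) dY =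
              PySem.Str.join "" ((PySem.List.pyRange 0 (dx + 1)).map
                (fun dX => pvCell grid (y0 + dY) (x0 + dX))) := by
            intro dY hm
            rw [List.all_eq_true] at hok
            have hlen := hok dY hm
            simp only [Function.comp_apply, decide_eq_true_eq] at hlen ⊢
            congr 1
            rw [show x0 + dx + 1 = x0 + (dx + 1) by ring,
              slice_eq_map_range _ x0 (dx + 1) "" hx0 (by omega) (by omega)]
            rfl
          rw [List.map_congr_left hrow, join_flat]
        · rw [if_neg hok, if_neg hok]
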